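-- pv_equiv track=rewrite | github.com/Salma-Yassin/Graduation-Project-Customer-Satisfaction-Detection-Using-DeepLearning | apps/helpers.py | summerize_video_body
-- ===== SOURCE A (Python) =====
-- def summerize_video_body(in_category):
--
--     summerized_categories = {'Happy': ['Engagement', 'Pleasure', 'Affection', 'Happiness', 'Esteem','Excitement', 'Surprise'],
--                 'Sad': ['Annoyance', 'Aversion', 'Sadness', 'Sensitivity', 'Suffering', 'Pain', 'Sympathy', 'Fatigue'],
--                 'Fearful': ['Disquietment', 'Doubt_Confusion', 'Fear'],
--                 'Neutral': ['Embarrassment', 'Peace', 'Yearning', 'Anticipation'],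
--                 'Angry': ['Disapproval', 'Disconnection']}
--
--     mapped_results = {}
--
--     for category, emotions in summerized_categories.items():
--         total_score = 0
--         for emotion in emotions:
--             total_score += in_category.get(emotion, 0)
--         mapped_results[category] = total_score
--     return mapped_results
-- ===== SOURCE B (Python) =====
-- def summerize_video_body(in_category):
--     summerized_categories = {'Happy': ['Engagement', 'Pleasure', 'Affection', 'Happiness', 'Esteem','Excitement', 'Surprise'],
--                 'Sad': ['Annoyance', 'Aversion', 'Sadness', 'Sensitivity', 'Suffering', 'Pain', 'Sympathy', 'Fatigue'],
--                 'Fearful': ['Disquietment', 'Doubt_Confusion', 'Fear'],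
--                 'Neutral': ['Embarrassment', 'Peace', 'Yearning', 'Anticipation'],
--                 'Angry': ['Disapproval', 'Disconnection']}
--
--     # inverted index: emotion -> summarized category
--     index = {emotion: category
--              for category, emotions in summerized_categories.items()
--              for emotion in emotions}
--
--     mapped_results = {category: 0 for category in summerized_categories}
--
--     for emotion, score in in_category.items():
--         category = index.get(emotion)
--         if category is not None:
--             mapped_results[category] = mapped_results.get(category, 0) + score
--     return mapped_results
-- ===== Notes on version B (the rewrite author's own statement) =====
-- stated objective: idiomatic
-- what changed: Replaces the nested loop over categories and their emotion lists (a dict lookup per emotion) by a precomputed inverted emotion-to-category index and a single pass over the input items that adds each score into zero-initialized category buckets; Pre_ only excludes duplicate-key association lists, which no Python dict produces.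
import Mathlib
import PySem

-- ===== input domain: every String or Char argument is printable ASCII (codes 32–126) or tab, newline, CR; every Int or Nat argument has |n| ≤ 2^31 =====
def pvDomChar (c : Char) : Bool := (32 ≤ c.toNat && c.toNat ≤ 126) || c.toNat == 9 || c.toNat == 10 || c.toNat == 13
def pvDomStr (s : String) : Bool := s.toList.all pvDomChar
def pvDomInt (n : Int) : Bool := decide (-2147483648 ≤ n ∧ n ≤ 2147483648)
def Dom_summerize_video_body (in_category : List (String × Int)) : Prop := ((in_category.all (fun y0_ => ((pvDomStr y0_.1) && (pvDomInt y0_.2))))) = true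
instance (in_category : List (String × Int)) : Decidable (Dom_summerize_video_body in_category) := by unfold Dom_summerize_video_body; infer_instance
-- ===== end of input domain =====

-- B replaces A's nested loop over categories and their emotion lists by a precomputed
-- inverted emotion-to-category index and a single pass over the input items into
-- zero-initialized category buckets (idiomatic; same exact result).


-- ===== PORT A =====
-- the literal `summerized_categories` dict (shared data of both programs)
def pvCats : List (String × List String) :=
  [("Happy", ["Engagement", "Pleasure", "Affection", "Happiness", "Esteem", "Excitement", "Surprise"]),
   ("Sad", ["Annoyance", "Aversion", "Sadness", "Sensitivity", "Suffering", "Pain", "Sympathy", "Fatigue"]),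
   ("Fearful", ["Disquietment", "Doubt_Confusion", "Fear"]),
   ("Neutral", ["Embarrassment", "Peace", "Yearning", "Anticipation"]),
   ("Angry", ["Disapproval", "Disconnection"])]

def summerize_video_body (in_category : List (String × Int)) : List (String × Int) :=
  (pvCats.foldl (fun mapped_results p =>
      mapped_results.insert p.1
        (p.2.foldl (fun total_score emotion =>
            total_score + (PySem.Dict.mk in_category).getD emotion 0) 0))
    PySem.Dict.empty).items

-- ===== PORT B =====
-- inverted index {emotion: category} (the dict comprehension of Source B)
def pvIndex : PySem.Dict String String :=
  pvCats.foldl (fun d p => p.2.foldl (fun d2 emotion => d2.insert emotion p.1) d) PySem.Dict.empty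

-- {category: 0 for category in summerized_categories}
def pvInit : PySem.Dict String Int :=
  pvCats.foldl (fun d p => d.insert p.1 0) PySem.Dict.empty

def summerize_video_body_alt (in_category : List (String × Int)) : List (String × Int) :=
  (in_category.foldl (fun mapped_results kv =>
      match pvIndex.get? kv.1 with
      | some category => mapped_results.insert category (mapped_results.getD category 0 + kv.2)
      | none => mapped_results) pvInit).items

-- ===== PRECONDITION & SPEC =====
-- Pre_ excludes association lists with duplicate keys: no Python dict produces them, and on
-- that ambiguous representation A's first-match lookup and B's sum-over-all-entries pass are
-- both accidental readings.
def Pre_summerize_video_body (in_category : List (String × Int)) : Prop :=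
  (in_category.map Prod.fst).Nodup
instance (in_category : List (String × Int)) : Decidable (Pre_summerize_video_body in_category) := by unfold Pre_summerize_video_body; infer_instance

def pvWitness_summerize_video_body : (List (String × Int)) := [("Fear", 3), ("Peace", -1), ("xyz", 7)]

def Spec_summerize_video_body (in_category : List (String × Int)) (out : List (String × Int)) : Prop := out = summerize_video_body_alt in_category
instance (in_category : List (String × Int)) (out : List (String × Int)) : Decidable (Spec_summerize_video_body in_category out) := by unfold Spec_summerize_video_body; infer_instance

-- ===== CLAIM (what is proved, stated in full; the proofs are below) =====
def Claim_equal_summerize_video_body : Prop := ∀ (in_category : List (String × Int)), Dom_summerize_video_body in_category → Pre_summerize_video_body in_category → Spec_summerize_video_body in_category (summerize_video_body in_category)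

-- ===== LEMMAS AND PROOFS =====

-- the per-category total A computes, as a function of the input list
def pvAsum (es : List String) (l : List (String × Int)) : Int :=
  es.foldl (fun s e => s + (PySem.Dict.mk l).getD e 0) 0

theorem pvA_shape (l : List (String × Int)) :
    summerize_video_body l =
      [("Happy", pvAsum ["Engagement", "Pleasure", "Affection", "Happiness", "Esteem", "Excitement", "Surprise"] l),
       ("Sad", pvAsum ["Annoyance", "Aversion", "Sadness", "Sensitivity", "Suffering", "Pain", "Sympathy", "Fatigue"] l),
       ("Fearful", pvAsum ["Disquietment", "Doubt_Confusion", "Fear"] l),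
       ("Neutral", pvAsum ["Embarrassment", "Peace", "Yearning", "Anticipation"] l),
       ("Angry", pvAsum ["Disapproval", "Disconnection"] l)] := by
  rfl

theorem pvAsum_nil (es : List String) : pvAsum es [] = 0 := by
  simp [pvAsum, PySem.Dict.getD, PySem.Dict.get?]

theorem pv_sum_ite_mem (k : String) (v : Int) (es : List String) (hnd : es.Nodup) :
    (es.map (fun e => if k == e then v else 0)).sum = if k ∈ es then v else 0 := by
  induction es with
  | nil => simp
  | cons e es ih =>
    rcases List.nodup_cons.mp hnd with ⟨he, hnd'⟩
    simp only [List.map_cons, List.sum_cons, ih hnd', List.mem_cons]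
    by_cases hk : k = e
    · subst hk; simp [he]
    · simp [hk]

theorem pv_getD_cons (k e : String) (v : Int) (t : List (String × Int))
    (h : (PySem.Dict.mk t).getD k 0 = 0) :
    (PySem.Dict.mk ((k, v) :: t)).getD e 0 = (if k == e then v else 0) + (PySem.Dict.mk t).getD e 0 := by
  rw [PySem.Dict.getD_eq_get?_getD, PySem.Dict.get?_mk_cons]
  by_cases hk : k = e
  · subst hk; simp [h]
  · simp [hk, ← PySem.Dict.getD_eq_get?_getD]

theorem pvAsum_cons (es : List String) (k : String) (v : Int) (t : List (String × Int))
    (hnd : es.Nodup) (h : (PySem.Dict.mk t).getD k 0 = 0) :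
    pvAsum es ((k, v) :: t) = (if k ∈ es then v else 0) + pvAsum es t := by
  simp only [pvAsum, PySem.List.foldl_add, zero_add]
  rw [List.map_congr_left (fun e _ => pv_getD_cons k e v t h)]
  rw [PySem.List.sum_map_add_int, pv_sum_ite_mem k v es hnd]

theorem pvB_loop : ∀ (l : List (String × Int)), (l.map Prod.fst).Nodup →
    ∀ (a1 a2 a3 a4 a5 : Int),
    l.foldl (fun mapped_results kv =>
        match pvIndex.get? kv.1 with
        | some category => mapped_results.insert category (mapped_results.getD category 0 + kv.2)
        | none => mapped_results)
      (PySem.Dict.mk [("Happy", a1), ("Sad", a2), ("Fearful", a3), ("Neutral", a4), ("Angry", a5)])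
    = PySem.Dict.mk
      [("Happy", a1 + pvAsum ["Engagement", "Pleasure", "Affection", "Happiness", "Esteem", "Excitement", "Surprise"] l),
       ("Sad", a2 + pvAsum ["Annoyance", "Aversion", "Sadness", "Sensitivity", "Suffering", "Pain", "Sympathy", "Fatigue"] l),
       ("Fearful", a3 + pvAsum ["Disquietment", "Doubt_Confusion", "Fear"] l),
       ("Neutral", a4 + pvAsum ["Embarrassment", "Peace", "Yearning", "Anticipation"] l),
       ("Angry", a5 + pvAsum ["Disapproval", "Disconnection"] l)] := by
  intro l
  induction l with
  | nil => intro _ a1 a2 a3 a4 a5; simp [pvAsum_nil]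
  | cons kv t ih =>
    intro hnd a1 a2 a3 a4 a5
    obtain ⟨k, v⟩ := kv
    have hk : k ∉ t.map Prod.fst := (List.nodup_cons.mp (by simpa using hnd)).1
    have hnd' : (t.map Prod.fst).Nodup := (List.nodup_cons.mp (by simpa using hnd)).2
    have h0 : (PySem.Dict.mk t).getD k 0 = 0 := by
      apply PySem.Dict.getD_of_not_contains
      simpa [PySem.Dict.contains_eq_decide_mem_keys] using hk
    rw [List.foldl_cons]
    rcases hc : pvIndex.get? k with _ | c
    · have hkk : k ∉ (["Engagement", "Pleasure", "Affection", "Happiness", "Esteem", "Excitement", "Surprise", "Annoyance", "Aversion", "Sadness", "Sensitivity", "Suffering", "Pain", "Sympathy", "Fatigue", "Disquietment", "Doubt_Confusion", "Fear", "Embarrassment", "Peace", "Yearning", "Anticipation", "Disapproval", "Disconnection"] : List String) := by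
        rw [PySem.Dict.get?_eq_none_iff_not_mem_keys] at hc
        simpa only [show pvIndex.keys = ["Engagement", "Pleasure", "Affection", "Happiness", "Esteem", "Excitement", "Surprise", "Annoyance", "Aversion", "Sadness", "Sensitivity", "Suffering", "Pain", "Sympathy", "Fatigue", "Disquietment", "Doubt_Confusion", "Fear", "Embarrassment", "Peace", "Yearning", "Anticipation", "Disapproval", "Disconnection"] from rfl] using hc
      refine (ih hnd' a1 a2 a3 a4 a5).trans ?_
      simp only [List.mem_cons, List.not_mem_nil, or_false, not_or] at hkk
      obtain ⟨n1,n2,n3,n4,n5,n6,n7,n8,n9,n10,n11,n12,n13,n14,n15,n16,n17,n18,n19,n20,n21,n22,n23,n24⟩ := hkk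
      simp [pvAsum_cons ["Engagement", "Pleasure", "Affection", "Happiness", "Esteem", "Excitement", "Surprise"] _ v t (by decide) h0, pvAsum_cons ["Annoyance", "Aversion", "Sadness", "Sensitivity", "Suffering", "Pain", "Sympathy", "Fatigue"] _ v t (by decide) h0, pvAsum_cons ["Disquietment", "Doubt_Confusion", "Fear"] _ v t (by decide) h0, pvAsum_cons ["Embarrassment", "Peace", "Yearning", "Anticipation"] _ v t (by decide) h0, pvAsum_cons ["Disapproval", "Disconnection"] _ v t (by decide) h0, n1,n2,n3,n4,n5,n6,n7,n8,n9,n10,n11,n12,n13,n14,n15,n16,n17,n18,n19,n20,n21,n22,n23,n24]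
    · have hmem : (k, c) ∈ [("Engagement", "Happy"), ("Pleasure", "Happy"), ("Affection", "Happy"), ("Happiness", "Happy"), ("Esteem", "Happy"), ("Excitement", "Happy"), ("Surprise", "Happy"), ("Annoyance", "Sad"), ("Aversion", "Sad"), ("Sadness", "Sad"), ("Sensitivity", "Sad"), ("Suffering", "Sad"), ("Pain", "Sad"), ("Sympathy", "Sad"), ("Fatigue", "Sad"), ("Disquietment", "Fearful"), ("Doubt_Confusion", "Fearful"), ("Fear", "Fearful"), ("Embarrassment", "Neutral"), ("Peace", "Neutral"), ("Yearning", "Neutral"), ("Anticipation", "Neutral"), ("Disapproval", "Angry"), ("Disconnection", "Angry")] := by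
        have := PySem.Dict.mem_items_of_get?_eq_some _ hc
        simpa [show pvIndex.items = [("Engagement", "Happy"), ("Pleasure", "Happy"), ("Affection", "Happy"), ("Happiness", "Happy"), ("Esteem", "Happy"), ("Excitement", "Happy"), ("Surprise", "Happy"), ("Annoyance", "Sad"), ("Aversion", "Sad"), ("Sadness", "Sad"), ("Sensitivity", "Sad"), ("Suffering", "Sad"), ("Pain", "Sad"), ("Sympathy", "Sad"), ("Fatigue", "Sad"), ("Disquietment", "Fearful"), ("Doubt_Confusion", "Fearful"), ("Fear", "Fearful"), ("Embarrassment", "Neutral"), ("Peace", "Neutral"), ("Yearning", "Neutral"), ("Anticipation", "Neutral"), ("Disapproval", "Angry"), ("Disconnection", "Angry")] from rfl] using this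
      simp only [List.mem_cons, Prod.mk.injEq, List.not_mem_nil, or_false] at hmem
      rcases hmem with ⟨rfl,rfl⟩|⟨rfl,rfl⟩|⟨rfl,rfl⟩|⟨rfl,rfl⟩|⟨rfl,rfl⟩|⟨rfl,rfl⟩|⟨rfl,rfl⟩|⟨rfl,rfl⟩|⟨rfl,rfl⟩|⟨rfl,rfl⟩|⟨rfl,rfl⟩|⟨rfl,rfl⟩|⟨rfl,rfl⟩|⟨rfl,rfl⟩|⟨rfl,rfl⟩|⟨rfl,rfl⟩|⟨rfl,rfl⟩|⟨rfl,rfl⟩|⟨rfl,rfl⟩|⟨rfl,rfl⟩|⟨rfl,rfl⟩|⟨rfl,rfl⟩|⟨rfl,rfl⟩|⟨rfl,rfl⟩ <;>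
        · refine Eq.trans (ih hnd' _ _ _ _ _) ?_
          simp [pvAsum_cons ["Engagement", "Pleasure", "Affection", "Happiness", "Esteem", "Excitement", "Surprise"] _ v t (by decide) h0, pvAsum_cons ["Annoyance", "Aversion", "Sadness", "Sensitivity", "Suffering", "Pain", "Sympathy", "Fatigue"] _ v t (by decide) h0, pvAsum_cons ["Disquietment", "Doubt_Confusion", "Fear"] _ v t (by decide) h0, pvAsum_cons ["Embarrassment", "Peace", "Yearning", "Anticipation"] _ v t (by decide) h0, pvAsum_cons ["Disapproval", "Disconnection"] _ v t (by decide) h0, add_assoc]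
          try rfl

-- ===== VERDICT (by name: the statement is the Claim_ definition above) =====
theorem summerize_video_body_spec : Claim_equal_summerize_video_body := by
  intro l _ hpre
  unfold Spec_summerize_video_body
  have hB := pvB_loop l hpre 0 0 0 0 0
  have halt : summerize_video_body_alt l =
      (PySem.Dict.mk
        [("Happy", 0 + pvAsum ["Engagement", "Pleasure", "Affection", "Happiness", "Esteem", "Excitement", "Surprise"] l),
         ("Sad", 0 + pvAsum ["Annoyance", "Aversion", "Sadness", "Sensitivity", "Suffering", "Pain", "Sympathy", "Fatigue"] l),
         ("Fearful", 0 + pvAsum ["Disquietment", "Doubt_Confusion", "Fear"] l),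
         ("Neutral", 0 + pvAsum ["Embarrassment", "Peace", "Yearning", "Anticipation"] l),
         ("Angry", 0 + pvAsum ["Disapproval", "Disconnection"] l)]).items := by
    unfold summerize_video_body_alt
    rw [show pvInit = PySem.Dict.mk [("Happy", (0:Int)), ("Sad", 0), ("Fearful", 0), ("Neutral", 0), ("Angry", 0)] from rfl, hB]
  rw [pvA_shape, halt]
  simp
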